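-- pv_equiv track=rewrite | github.com/whatalnk/my-topcoder | srm670/div2/SRM670_Div2_Med_Drbalance.py | lesscng
-- ===== SOURCE A (Python) =====
-- def lesscng(s, k):
--     l = list(s)
--     res = 0
--     while True:
--         costs = [l.count("+") - l.count("-")]
--         for i in range(len(l)):
--             ll = l[:-i]
--             costs.append(ll.count("+") - ll.count("-"))
--         costs_sum = len([i for i in costs if i < 0])
--         if costs_sum > k:
--             i = l.index("-")
--             l[i] = "+"
--             res += 1
--         else:
--             return res
-- ===== SOURCE B (Python) =====
-- def lesscng(s, k):
--     # B: same greedy (flip the leftmost '-' until ok), but the number of negative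
--     # prefix balances is recomputed in ONE running-sum pass instead of A's
--     # quadratic pass of slices with .count() -- O(n^2) total vs A's O(n^3).
--     l = list(s)
--     flips = 0
--     while True:
--         bal = 0
--         neg = 0
--         for c in l:
--             if c == '+':
--                 bal += 1
--             elif c == '-':
--                 bal -= 1
--             if bal < 0:
--                 neg += 1
--         if neg <= k:
--             return flips
--         l[l.index('-')] = '+'
--         flips += 1
-- ===== Notes on version B (the rewrite author's own statement) =====
-- stated objective: faster
-- what changed: A recounts the negative prefix balances each iteration by building every slice l[:-i] and calling list.count twice on it (quadratic per flip); B gets the same count from one running-sum pass per flip, keeping the same greedy flip of the leftmost '-'.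
import Mathlib
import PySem

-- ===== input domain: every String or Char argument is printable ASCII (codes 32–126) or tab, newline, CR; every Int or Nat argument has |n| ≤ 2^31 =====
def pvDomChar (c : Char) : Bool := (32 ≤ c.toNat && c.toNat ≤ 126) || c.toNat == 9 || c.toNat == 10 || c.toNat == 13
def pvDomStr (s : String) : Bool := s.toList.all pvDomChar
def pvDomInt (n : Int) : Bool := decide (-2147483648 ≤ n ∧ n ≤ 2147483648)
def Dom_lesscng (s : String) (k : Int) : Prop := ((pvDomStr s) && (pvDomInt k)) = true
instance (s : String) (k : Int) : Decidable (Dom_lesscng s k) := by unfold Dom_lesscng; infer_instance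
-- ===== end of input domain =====

-- B keeps A's greedy outer loop (flip the leftmost '-' until enough) but replaces A's
-- per-iteration quadratic recount (balance of every slice l[:-i] via list.count) by a
-- single running-sum pass; measured faster (asymptotic mechanism: O(n^3) -> O(n^2)).


-- ===== PORT A =====
-- ll.count("+") - ll.count("-")
def lesscngBal (l : List Char) : Int :=
  (PySem.List.count l '+' : Int) - (PySem.List.count l '-' : Int)

-- costs = [l.count("+") - l.count("-")]; for i in range(len(l)): costs.append(bal of l[:-i])
def lesscngCosts (l : List Char) : List Int :=
  (PySem.List.pyRange 0 (l.length : Int) 1).foldl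
    (fun costs i => costs ++ [lesscngBal (PySem.List.slice l none (some (-i)))])
    [lesscngBal l]

-- the 'while True' loop; fuel = number of '-' + 1 always suffices when 0 ≤ k (each
-- non-returning iteration replaces one '-' by '+', and with no '-' left costs_sum = 0 ≤ k);
-- where l.index("-") would raise ValueError (reachable only for k < 0, outside Pre_)
-- the port returns res.
def lesscngLoop : Nat → List Char → Int → Int → Int
  | 0, _, _, res => res
  | fuel + 1, l, k, res =>
    let costsSum : Int := ((lesscngCosts l).filter (fun x => decide (x < 0))).length
    if costsSum > k then
      match PySem.List.index? l '-' with
      | none => res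
      | some i => lesscngLoop fuel (l.set i '+') k (res + 1)
    else res

def lesscng (s : String) (k : Int) : Int :=
  lesscngLoop (PySem.List.count s.toList '-' + 1) s.toList k 0

-- ===== PORT B =====
-- Source B's single pass: bal += 1 / -= 1 per char, neg counts the negative running balances
def lesscngScan (l : List Char) : Int × Int :=
  l.foldl
    (fun p c =>
      let b := if c = '+' then p.1 + 1 else if c = '-' then p.1 - 1 else p.1
      (b, if b < 0 then p.2 + 1 else p.2))
    (0, 0)

-- Source B's 'while True' loop, same fuel convention as A's port
def lesscngAltLoop : Nat → List Char → Int → Int → Int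
  | 0, _, _, flips => flips
  | fuel + 1, l, k, flips =>
    if (lesscngScan l).2 ≤ k then flips
    else
      match PySem.List.index? l '-' with
      | none => flips
      | some i => lesscngAltLoop fuel (l.set i '+') k (flips + 1)

def lesscng_alt (s : String) (k : Int) : Int :=
  lesscngAltLoop (PySem.List.count s.toList '-' + 1) s.toList k 0

-- ===== PRECONDITION & SPEC =====
-- Pre_ excludes exactly k < 0: there A eventually flips every '-' and then l.index("-")
-- raises ValueError (Source B raises there too), so A returns on exactly the inputs with 0 ≤ k.
def Pre_lesscng (s : String) (k : Int) : Prop := 0 ≤ k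
instance (s : String) (k : Int) : Decidable (Pre_lesscng s k) := by unfold Pre_lesscng; infer_instance

def pvWitness_lesscng : String × Int := ("--+x-", 1)

def Spec_lesscng (s : String) (k : Int) (out : Int) : Prop := out = lesscng_alt s k
instance (s : String) (k : Int) (out : Int) : Decidable (Spec_lesscng s k out) := by unfold Spec_lesscng; infer_instance

-- ===== CLAIM (what is proved, stated in full; the proofs are below) =====
def Claim_equal_lesscng : Prop := ∀ (s : String) (k : Int), Dom_lesscng s k → Pre_lesscng s k → Spec_lesscng s k (lesscng s k)

-- ===== LEMMAS AND PROOFS =====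

lemma lesscngBal_nil : lesscngBal [] = 0 := by simp [lesscngBal, PySem.List.count]

lemma lesscngBal_cons (c : Char) (cs : List Char) :
    lesscngBal (c :: cs) = (if c = '+' then 1 else if c = '-' then -1 else 0) + lesscngBal cs := by
  simp only [lesscngBal, PySem.List.count_eq, List.count_cons]
  by_cases h1 : c = '+'
  · subst h1; simp; ring
  · by_cases h2 : c = '-'
    · subst h2; simp [h1]; ring
    · simp [h1, h2, beq_iff_eq]

-- the 0/1 weight of prefix length j of l in the negative-prefix count
def lesscngW (l : List Char) (j : Nat) : Nat :=
  if lesscngBal (l.take j) < 0 then 1 else 0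

lemma lesscngW_zero (l : List Char) : lesscngW l 0 = 0 := by
  simp [lesscngW, lesscngBal_nil]

lemma countP_range_eq_sum (n : Nat) (p : Nat → Bool) :
    (List.range n).countP p = ∑ j ∈ Finset.range n, (if p j then 1 else 0) := by
  induction n with
  | zero => simp
  | succ m ih =>
      rw [List.range_succ, List.countP_append, Finset.sum_range_succ, ih]
      simp [List.countP_cons]

-- A's costs list, as a head plus a mapped range
lemma lesscngCosts_eq (l : List Char) :
    lesscngCosts l
      = lesscngBal l ::
        (List.range l.length).map
          (fun (j : Nat) => lesscngBal (PySem.List.slice l none (some (-(j : Int))))) := by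
  unfold lesscngCosts
  rw [PySem.List.foldl_append_singleton_eq_map, PySem.List.pyRange_one, List.map_map]
  refine congrArg (lesscngBal l :: ·) (List.map_congr_left ?_)
  intro a _
  simp

-- the slice l[:-i] (i = 0 gives the empty prefix, i > 0 the prefix of length n - i)
lemma lesscng_slice_eq (l : List Char) (j : Nat) :
    PySem.List.slice l none (some (-(j : Int)))
      = l.take (if j = 0 then 0 else l.length - j) := by
  by_cases h : j = 0
  · subst h
    rw [if_pos rfl]
    simpa using PySem.List.slice_to (xs := l) (b := 0) le_rfl
  · rw [if_neg h, PySem.List.slice_to_neg_natCast l j (Nat.pos_of_ne_zero h)]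

-- A's negative-costs count is the sum of the weights of the prefixes of length 1..n
lemma lesscng_costsSum (l : List Char) :
    (((lesscngCosts l).filter (fun x => decide (x < 0))).length : Int)
      = ((∑ j ∈ Finset.range l.length, lesscngW l (j + 1) : Nat) : Int) := by
  rw [← List.countP_eq_length_filter, lesscngCosts_eq, List.countP_cons, List.countP_map]
  have hcong : (List.range l.length).countP
      ((fun x => decide (x < 0)) ∘ (fun (j : Nat) => lesscngBal (PySem.List.slice l none (some (-(j : Int))))))
      = (List.range l.length).countP
        (fun j => decide (lesscngBal (l.take (if j = 0 then 0 else l.length - j)) < 0)) := by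
    refine List.countP_congr ?_
    intro j _
    simp [Function.comp, lesscng_slice_eq l j]
  rw [hcong, countP_range_eq_sum]
  have hW : ∀ j : Nat, (if decide (lesscngBal (l.take (if j = 0 then 0 else l.length - j)) < 0) then 1 else 0)
      = lesscngW l (if j = 0 then 0 else l.length - j) := by
    intro j; simp [lesscngW]
  simp only [hW]
  have hhead : (if decide (lesscngBal l < 0) then 1 else 0) = lesscngW l l.length := by
    simp [lesscngW, List.take_length]
  rw [hhead]
  -- the head (length n) plus the lengths {0, n-1, ..., 1} is a permutation of the lengths 1..n
  have key : ∀ n : Nat, lesscngW l n + ∑ j ∈ Finset.range n, lesscngW l (if j = 0 then 0 else n - j)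
      = ∑ j ∈ Finset.range n, lesscngW l (j + 1) := by
    intro n
    cases n with
    | zero => simp [lesscngW_zero]
    | succ m =>
        rw [Finset.sum_range_succ' (fun j => lesscngW l (if j = 0 then 0 else m + 1 - j)) m]
        have h0 : lesscngW l (if (0 : Nat) = 0 then 0 else m + 1 - 0) = 0 := by
          simp [lesscngW_zero]
        rw [h0, add_zero]
        have h1 : ∑ j ∈ Finset.range m, lesscngW l (if j + 1 = 0 then 0 else m + 1 - (j + 1))
            = ∑ j ∈ Finset.range m, lesscngW l (m - 1 - j + 1) := by
          refine Finset.sum_congr rfl ?_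
          intro j hj
          have hj' := Finset.mem_range.mp hj
          have he : (if j + 1 = 0 then 0 else m + 1 - (j + 1)) = m - 1 - j + 1 := by
            simp only [Nat.succ_ne_zero, if_false]
            omega
          rw [he]
        rw [h1, Finset.sum_range_reflect (fun j => lesscngW l (j + 1)) m,
          Finset.sum_range_succ (fun j => lesscngW l (j + 1)) m]
        omega
  rw [← key l.length]
  push_cast
  ring

-- B's scan computes the total balance and the same count of negative prefixes
lemma lesscngScan_spec (l : List Char) : ∀ (b m : Int),
    l.foldl
      (fun p c =>
        let x := if c = '+' then p.1 + 1 else if c = '-' then p.1 - 1 else p.1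
        (x, if x < 0 then p.2 + 1 else p.2)) (b, m)
      = (b + lesscngBal l,
         m + ((∑ j ∈ Finset.range l.length,
                (if b + lesscngBal (l.take (j + 1)) < 0 then (1 : Nat) else 0) : Nat) : Int)) := by
  induction l with
  | nil => intro b m; simp [lesscngBal_nil]
  | cons c cs ih =>
      intro b m
      show cs.foldl _
          ((if c = '+' then b + 1 else if c = '-' then b - 1 else b),
           (if (if c = '+' then b + 1 else if c = '-' then b - 1 else b) < 0 then m + 1 else m))
        = _
      rw [ih]
      have hx : (if c = '+' then b + 1 else if c = '-' then b - 1 else b)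
          = b + (if c = '+' then 1 else if c = '-' then -1 else 0) := by
        split_ifs <;> ring
      rw [hx, Prod.mk.injEq]
      constructor
      · rw [lesscngBal_cons]; ring
      · simp only [List.length_cons]
        rw [Finset.sum_range_succ'
          (fun j => if b + lesscngBal ((c :: cs).take (j + 1)) < 0 then (1 : Nat) else 0) cs.length]
        simp only [List.take_succ_cons, List.take_zero, lesscngBal_cons, lesscngBal_nil,
          add_zero, ← add_assoc]
        push_cast
        split_ifs <;> ring

-- the two recounts agree on every list
lemma lesscng_counts_agree (l : List Char) :
    (((lesscngCosts l).filter (fun x => decide (x < 0))).length : Int) = (lesscngScan l).2 := by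
  rw [lesscng_costsSum]
  unfold lesscngScan
  rw [lesscngScan_spec l 0 0]
  simp [lesscngW]

-- the two loops agree step by step (same flip, complementary branch tests)
lemma lesscngLoop_eq_alt (fuel : Nat) : ∀ (l : List Char) (k res : Int),
    lesscngLoop fuel l k res = lesscngAltLoop fuel l k res := by
  induction fuel with
  | zero => intro l k res; rfl
  | succ f ih =>
      intro l k res
      show (if (((lesscngCosts l).filter (fun x => decide (x < 0))).length : Int) > k then
              match PySem.List.index? l '-' with
              | none => res
              | some i => lesscngLoop f (l.set i '+') k (res + 1)
            else res)
          = (if (lesscngScan l).2 ≤ k then res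
             else match PySem.List.index? l '-' with
              | none => res
              | some i => lesscngAltLoop f (l.set i '+') k (res + 1))
      rw [lesscng_counts_agree l]
      by_cases h : (lesscngScan l).2 ≤ k
      · rw [if_neg (by omega), if_pos h]
      · rw [if_pos (by omega), if_neg h]
        cases PySem.List.index? l '-' with
        | none => rfl
        | some i => exact ih _ _ _

-- ===== VERDICT (by name: the statement is the Claim_ definition above) =====
theorem lesscng_spec : Claim_equal_lesscng := by
  intro s k _ _
  show lesscng s k = lesscng_alt s k
  exact lesscngLoop_eq_alt _ _ _ _
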